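-- pv_equiv track=rewrite | github.com/AddictedToBattlestar/aoc-python | src/day7_camel_cards/camel_card_calculator.py | is_high_card_hand
-- ===== SOURCE A (Python) =====
-- from typing import Optional
--
-- def is_high_card_hand(hand) -> bool:
--     ranks_in_hand = get_ranks_sorted(hand)
--     previous_rank = ranks_in_hand[0]
--     for current_rank in ranks_in_hand[1:]:
--         if previous_rank + 1 != current_rank:
--             return False
--         previous_rank = current_rank
--     return True
--
-- def get_rank_of_card(card: Optional[str]):
--     if card is None:
--         return 0
--     else:
--         return "23456789TJQKA".index(card)
--
-- def get_ranks_sorted(hand):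
--     return sorted(map(lambda card: get_rank_of_card(card), hand))
-- ===== SOURCE B (Python) =====
-- from typing import Optional
--
-- def is_high_card_hand(hand) -> bool:
--     ranks = {get_rank_of_card(card) for card in hand}
--     return len(ranks) == len(hand) and max(ranks) - min(ranks) == len(hand) - 1
--
-- def get_rank_of_card(card: Optional[str]):
--     if card is None:
--         return 0
--     else:
--         return "23456789TJQKA".index(card)
--
-- def get_ranks_sorted(hand):
--     return sorted(map(lambda card: get_rank_of_card(card), hand))
-- ===== Notes on version B (the rewrite author's own statement) =====
-- stated objective: alternative
-- what changed: B drops A's sort-then-adjacent-pair scan entirely: it collects the ranks into a set and decides consecutiveness by the pigeonhole test len(set)==len(hand) and max-min==len(hand)-1.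
import Mathlib
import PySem

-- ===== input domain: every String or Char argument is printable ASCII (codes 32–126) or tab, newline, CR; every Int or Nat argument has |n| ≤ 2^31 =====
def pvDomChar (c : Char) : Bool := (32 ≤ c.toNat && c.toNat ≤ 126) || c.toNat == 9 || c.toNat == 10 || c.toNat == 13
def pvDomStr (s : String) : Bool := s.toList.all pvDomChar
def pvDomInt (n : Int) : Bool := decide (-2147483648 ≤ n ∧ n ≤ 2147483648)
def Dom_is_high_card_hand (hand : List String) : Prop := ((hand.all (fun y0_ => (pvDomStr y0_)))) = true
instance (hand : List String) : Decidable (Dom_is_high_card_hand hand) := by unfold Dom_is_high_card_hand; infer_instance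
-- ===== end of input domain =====

-- B avoids the consecutive-pair scan over the sorted ranks entirely: it collects the
-- ranks into a set and checks |set| = |hand| and max - min = |hand| - 1 (objective: alternative).


-- ===== PORT A =====
-- get_rank_of_card: the None branch is unreachable for a List String argument; '.index'
-- ported as PySem.Str.find (exact where the substring occurs; Pre_ excludes the ValueError case).
def get_rank_of_card (card : String) : Int :=
  PySem.Str.find "23456789TJQKA" card

def get_ranks_sorted (hand : List String) : List Int :=
  PySem.List.sorted (hand.map (fun card => get_rank_of_card card)) (fun x => x) false

-- the 'for current_rank in ranks_in_hand[1:]' loop with early return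
def pvScanA (previous_rank : Int) : List Int → Bool
  | [] => true
  | current_rank :: rest =>
      if previous_rank + 1 ≠ current_rank then false
      else pvScanA current_rank rest

def is_high_card_hand (hand : List String) : Bool :=
  let ranks_in_hand := get_ranks_sorted hand
  match PySem.List.pyGet? ranks_in_hand 0 with
  | none => false   -- IndexError on empty hand; excluded by Pre_
  | some previous_rank => pvScanA previous_rank (PySem.List.slice ranks_in_hand (some 1) none)

-- ===== PORT B =====
def is_high_card_hand_alt (hand : List String) : Bool :=
  let ranks : PySem.Set Int := PySem.Set.ofList (hand.map (fun card => get_rank_of_card card))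
  if PySem.Set.len ranks = (hand.length : Int) then
    match PySem.List.max? ranks (fun x => x), PySem.List.min? ranks (fun x => x) with
    | some mx, some mn => decide (mx - mn = (hand.length : Int) - 1)
    | _, _ => false   -- max()/min() of the empty set raise ValueError; excluded by Pre_
  else false

-- ===== PRECONDITION & SPEC =====
-- Pre_ excludes exactly the inputs where A raises: the empty hand (IndexError) and any
-- card that is not a substring of "23456789TJQKA" (ValueError from str.index).
def Pre_is_high_card_hand (hand : List String) : Prop :=
  hand ≠ [] ∧ ∀ c ∈ hand, PySem.Str.isIn c "23456789TJQKA" = true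
instance (hand : List String) : Decidable (Pre_is_high_card_hand hand) := by
  unfold Pre_is_high_card_hand; infer_instance

def pvWitness_is_high_card_hand : List String := ["3", "2", "4"]

def Spec_is_high_card_hand (hand : List String) (out : Bool) : Prop := out = is_high_card_hand_alt hand
instance (hand : List String) (out : Bool) : Decidable (Spec_is_high_card_hand hand out) := by unfold Spec_is_high_card_hand; infer_instance

-- ===== CLAIM (what is proved, stated in full; the proofs are below) =====
def Claim_equal_is_high_card_hand : Prop := ∀ (hand : List String), Dom_is_high_card_hand hand → Pre_is_high_card_hand hand → Spec_is_high_card_hand hand (is_high_card_hand hand)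

-- ===== LEMMAS AND PROOFS =====

-- A's adjacent scan from prev over l succeeds iff prev :: l is the consecutive range.
theorem pvScanA_eq_range (l : List Int) : ∀ prev : Int,
    pvScanA prev l = decide (prev :: l = PySem.List.pyRange prev (prev + ((l.length : Int) + 1)) 1) := by
  induction l with
  | nil =>
      intro prev
      simp [pvScanA, PySem.List.pyRange_one_singleton]
  | cons c rest ih =>
      intro prev
      rw [PySem.List.pyRange_one_cons (by omega)]
      by_cases hc : prev + 1 = c
      · subst hc
        simp only [pvScanA, ne_eq, not_true_eq_false, if_false]
        rw [ih (prev + 1),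
            show prev + ((((prev + 1) :: rest).length : Int) + 1)
               = (prev + 1) + (((rest.length : Int)) + 1) by
              simp only [List.length_cons]; push_cast; ring]
        rw [decide_eq_decide]
        simp
      · have hner : pvScanA prev (c :: rest) = false := by
          simp [pvScanA, hc]
        rw [hner]
        have hnr : c :: rest ≠ PySem.List.pyRange (prev + 1) (prev + (((rest.length : Int)) + 1 + 1)) 1 := by
          intro h
          have hlt : prev + 1 < prev + (((rest.length : Int)) + 1 + 1) := by omega
          rw [PySem.List.pyRange_one_cons hlt] at h
          exact hc (by injection h with h1 _; omega)
        simp only [List.length_cons]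
        push_cast
        simp [hnr]

-- if deduplication loses nothing, the list had no duplicates
theorem pvNodup_of_ofList_length (l : List Int)
    (h : (PySem.Set.ofList l : List Int).length = l.length) : l.Nodup := by
  have h1 : (PySem.Set.ofList l : List Int).length = l.toFinset.card := by
    have hn := PySem.Set.nodup_ofList (α := Int) l
    have hfs : (PySem.Set.ofList l : List Int).toFinset = l.toFinset := by
      apply Finset.ext; intro x
      simp [List.mem_toFinset, PySem.Set.mem_ofList]
    rw [← List.toFinset_card_of_nodup hn, hfs]
  have h2 : l.toFinset.card = l.dedup.length := List.card_toFinset l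
  have h3 : l.dedup.length = l.length := by omega
  have := List.Sublist.eq_of_length (List.dedup_sublist l) h3
  rw [← this]; exact List.nodup_dedup l

-- a nonempty nodup list of ints with max - min = len - 1 sorts to the consecutive range
theorem pvSorted_eq_range_iff (l : List Int) (r : Int) (t : List Int)
    (hs : PySem.List.sorted l (fun x => x) false = r :: t)
    (hnd : l.Nodup) (mx mn : Int)
    (hmx : PySem.List.max? l (fun x => x) = some mx)
    (hmn : PySem.List.min? l (fun x => x) = some mn) :
    (r :: t = PySem.List.pyRange r (r + ((t.length : Int) + 1)) 1) ↔
      (mx - mn = (l.length : Int) - 1) := by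
  have hperm : (r :: t).Perm l := hs ▸ PySem.List.sorted_perm l (fun x => x) false
  have hlen : l.length = t.length + 1 := by
    have := hperm.length_eq; simpa using this.symm
  constructor
  · intro h
    have hmnl := PySem.List.min?_mem hmn
    have hmxl := PySem.List.max?_mem hmx
    have hmem : ∀ x, x ∈ l ↔ r ≤ x ∧ x < r + ((t.length : Int) + 1) := by
      intro x
      rw [← hperm.mem_iff, h, PySem.List.mem_pyRange_one]
    -- mn = r
    have hr_mem : r ∈ l := (hperm.mem_iff).1 (List.mem_cons_self)
    have h1 : r ≤ mn := ((hmem mn).1 hmnl).1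
    have h2 : mn ≤ r := PySem.List.min?_isMin hmn r hr_mem
    -- mx = r + t.length
    have htop : (r + (t.length : Int)) ∈ l := (hmem _).2 (by omega)
    have h3 : mx ≤ r + (t.length : Int) := by
      have := ((hmem mx).1 hmxl).2; omega
    have h4 : r + (t.length : Int) ≤ mx := PySem.List.max?_isMax hmx _ htop
    omega
  · intro h
    have hmnl := PySem.List.min?_mem hmn
    have hmxl := PySem.List.max?_mem hmx
    have hbound : ∀ x ∈ l, mn ≤ x ∧ x ≤ mx := fun x hx =>
      ⟨PySem.List.min?_isMin hmn x hx, PySem.List.max?_isMax hmx x hx⟩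
    -- l's elements are exactly the interval [mn, mx]
    have hsub : l.toFinset ⊆ Finset.Icc mn mx := by
      intro x hx
      rw [List.mem_toFinset] at hx
      rw [Finset.mem_Icc]; exact hbound x hx
    have hcard : l.toFinset.card = l.length := List.toFinset_card_of_nodup hnd
    have hicc : (Finset.Icc mn mx).card = l.length := by
      rw [Int.card_Icc]; omega
    have hfeq : l.toFinset = Finset.Icc mn mx :=
      Finset.eq_of_subset_of_card_le hsub (by omega)
    have hrange : (PySem.List.pyRange mn (mn + (l.length : Int)) 1).Perm l := by
      apply List.perm_of_nodup_nodup_toFinset_eq (PySem.List.nodup_pyRange_one _ _) hnd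
      apply Finset.ext; intro x
      simp only [List.mem_toFinset, PySem.List.mem_pyRange_one]
      rw [← List.mem_toFinset, hfeq, Finset.mem_Icc]
      omega
    have hsr : PySem.List.sorted l (fun x => x) false = PySem.List.pyRange mn (mn + (l.length : Int)) 1 :=
      PySem.List.sorted_eq_of_perm_of_pairwise_lt _ _ _ hrange (PySem.List.pairwise_lt_pyRange_one mn _)
    rw [hs] at hsr
    have hlt : mn < mn + (l.length : Int) := by omega
    rw [PySem.List.pyRange_one_cons hlt] at hsr
    have hr : r = mn := by injection hsr with h1 _
    have hcast : (l.length : Int) = (t.length : Int) + 1 := by omega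
    rw [hsr, hr, hcast, PySem.List.pyRange_one_cons
      (show mn < mn + ((t.length : Int) + 1) by omega)]

theorem is_high_card_hand_spec : Claim_equal_is_high_card_hand := by
  intro hand _ hpre
  unfold Spec_is_high_card_hand is_high_card_hand is_high_card_hand_alt
  set l : List Int := hand.map (fun card => get_rank_of_card card) with hl
  have hlne : l ≠ [] := by
    simp only [hl, ne_eq, List.map_eq_nil_iff]; exact hpre.1
  have hne : get_ranks_sorted hand ≠ [] := by
    unfold get_ranks_sorted
    rw [ne_eq, PySem.List.sorted_eq_nil_iff]; exact hlne
  obtain ⟨r, t, hrt⟩ := List.exists_cons_of_ne_nil hne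
  have hlenl : l.length = hand.length := by simp [hl]
  have hsort : PySem.List.sorted l (fun x => x) false = r :: t := hrt
  have hlen : l.length = t.length + 1 := by
    have := (hsort ▸ PySem.List.sorted_perm l (fun x => x) false).length_eq
    simpa using this.symm
  simp only [hrt]
  have hget : PySem.List.pyGet? (r :: t) 0 = some r := by
    simp [PySem.List.pyGet?, PySem.List.pyIdx?]
  rw [hget]
  dsimp only
  rw [PySem.List.slice_from_one, List.tail_cons, pvScanA_eq_range t r]
  by_cases hnd : l.Nodup
  · -- no duplicate ranks: B takes the max-min branch
    have hofl : PySem.Set.ofList l = l := PySem.Set.ofList_eq_self_of_nodup l hnd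
    have hiftrue : PySem.Set.len (PySem.Set.ofList l) = (hand.length : Int) := by
      simp [PySem.Set.len, hofl, hlenl]
    rw [if_pos hiftrue]
    obtain ⟨mx, hmx⟩ : ∃ mx, PySem.List.max? (PySem.Set.ofList l : List Int) (fun x => x) = some mx := by
      cases hmxo : PySem.List.max? (PySem.Set.ofList l : List Int) (fun x => x) with
      | none => exact absurd ((PySem.List.max?_eq_none_iff _ _).mp hmxo) (by simp [hofl, hlne])
      | some v => exact ⟨v, rfl⟩
    obtain ⟨mn, hmn⟩ : ∃ mn, PySem.List.min? (PySem.Set.ofList l : List Int) (fun x => x) = some mn := by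
      cases hmno : PySem.List.min? (PySem.Set.ofList l : List Int) (fun x => x) with
      | none => exact absurd ((PySem.List.min?_eq_none_iff _ _).mp hmno) (by simp [hofl, hlne])
      | some v => exact ⟨v, rfl⟩
    rw [hmx, hmn]
    rw [hofl] at hmx hmn
    have hiff := pvSorted_eq_range_iff l r t hsort hnd mx mn hmx hmn
    rw [decide_eq_decide, hiff, hlenl]
  · -- duplicate ranks: A's sorted list cannot be the (nodup) range, and B's length test fails
    have hA : r :: t ≠ PySem.List.pyRange r (r + ((t.length : Int) + 1)) 1 := by
      intro h
      apply hnd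
      have hperm : (r :: t).Perm l := hsort ▸ PySem.List.sorted_perm l (fun x => x) false
      exact hperm.nodup_iff.mp (h ▸ PySem.List.nodup_pyRange_one _ _)
    have hB : ¬ (PySem.Set.len (PySem.Set.ofList l) = (hand.length : Int)) := by
      intro h
      apply hnd
      apply pvNodup_of_ofList_length
      have : ((PySem.Set.ofList l : List Int).length : Int) = (l.length : Int) := by
        simpa [PySem.Set.len, hlenl] using h
      exact_mod_cast this
    rw [if_neg hB]
    simp [hA]
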